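-- pv_equiv track=rewrite | github.com/boliangyang96/NLP_project1 | P1/project1.py | getCorpusWithUnk
-- ===== SOURCE A (Python) =====
-- def getCorpusWithUnk(corpus, unigramCount):
--     temp = []
--     output = []
--     for word in unigramCount:
--         if unigramCount[word] == 1:
--             temp.append(word)
--     for i in range(len(corpus)):
--         output.append([])
--         for j in range(len(corpus[i])):
--             if corpus[i][j] in temp:
--                 output[i].append("<unk>")
--             else:
--                 output[i].append(corpus[i][j])
--     return output
-- ===== SOURCE B (Python) =====
-- def getCorpusWithUnk(corpus, unigramCount):
--     # vocabulary-major: start from a copy of the corpus and, for each vocabulary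
--     # entry counted exactly once, sweep the corpus replacing that word's occurrences
--     # (rows not containing it are kept as-is); no precomputed singleton table,
--     # no per-word membership decision against it
--     output = [list(sent) for sent in corpus]
--     for word, count in unigramCount.items():
--         if count == 1:
--             output = [["<unk>" if w == word else w for w in row] if word in row else row
--                       for row in output]
--     return output
-- ===== Notes on version B (the rewrite author's own statement) =====
-- stated objective: alternative
-- what changed: Inverts the traversal: instead of A's corpus-major pass deciding each word against a precomputed singleton list, B sweeps vocabulary-major, rewriting the whole (copied) corpus once per count-1 vocabulary entry, replacing that word's occurrences.
import Mathlib
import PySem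

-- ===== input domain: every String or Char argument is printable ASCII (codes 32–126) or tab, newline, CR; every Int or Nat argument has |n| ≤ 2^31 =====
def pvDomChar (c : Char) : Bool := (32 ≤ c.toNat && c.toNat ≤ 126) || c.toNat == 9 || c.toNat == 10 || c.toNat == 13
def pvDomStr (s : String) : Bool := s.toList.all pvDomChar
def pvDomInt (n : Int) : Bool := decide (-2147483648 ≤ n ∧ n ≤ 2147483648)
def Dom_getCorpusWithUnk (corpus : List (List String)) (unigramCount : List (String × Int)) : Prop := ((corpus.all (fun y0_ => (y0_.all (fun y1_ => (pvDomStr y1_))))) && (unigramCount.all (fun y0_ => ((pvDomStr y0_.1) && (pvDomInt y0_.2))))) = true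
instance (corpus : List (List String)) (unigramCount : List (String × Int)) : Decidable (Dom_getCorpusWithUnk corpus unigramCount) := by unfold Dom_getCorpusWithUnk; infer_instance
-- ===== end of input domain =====

-- B inverts the traversal: instead of A's corpus-major pass over a precomputed singleton
-- table, it sweeps vocabulary-major, rewriting the copied corpus once per count-1 entry
-- (alternative decomposition; same output).

-- ===== PORT A =====
-- literal transliteration: build 'temp' (singleton keys), then index loops over corpus
def getCorpusWithUnk (corpus : List (List String)) (unigramCount : List (String × Int)) : List (List String) :=
  let d := PySem.Dict.mk unigramCount
  let temp := d.keys.foldl (fun temp word =>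
      if d.get? word = some 1 then temp ++ [word] else temp) []
  (PySem.List.pyRange 0 (corpus.length : Int) 1).foldl (fun output i =>
      let row := PySem.List.pyGetD corpus i []
      output ++ [(PySem.List.pyRange 0 (row.length : Int) 1).foldl (fun r j =>
          let w := PySem.List.pyGetD row j ""
          if w ∈ temp then r ++ ["<unk>"] else r ++ [w]) []]) []

-- ===== PORT B =====
-- vocabulary-major: copy the corpus, then one rewriting sweep per count-1 vocabulary entry
-- (a row not containing the word is kept as-is)
def getCorpusWithUnk_alt (corpus : List (List String)) (unigramCount : List (String × Int)) : List (List String) :=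
  let output := corpus.map (fun sent => sent)
  (PySem.Dict.mk unigramCount).items.foldl (fun output p =>
    if p.2 = 1 then
      output.map (fun row =>
        if p.1 ∈ row then row.map (fun w => if w = p.1 then "<unk>" else w) else row)
    else output) output

-- ===== PRECONDITION & SPEC =====
-- The unigramCount parameter is a Python dict: an association list with duplicate keys does
-- not represent one (Python cannot produce it), so Pre_ requires the keys to be distinct.
def Pre_getCorpusWithUnk (corpus : List (List String)) (unigramCount : List (String × Int)) : Prop :=
  (unigramCount.map (·.1)).Nodup
instance (corpus : List (List String)) (unigramCount : List (String × Int)) : Decidable (Pre_getCorpusWithUnk corpus unigramCount) := by unfold Pre_getCorpusWithUnk; infer_instance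
def pvWitness_getCorpusWithUnk : List (List String) × (List (String × Int)) :=
  ([["a", "b"], ["a"]], [("a", 2), ("b", 1)])
def Spec_getCorpusWithUnk (corpus : List (List String)) (unigramCount : List (String × Int)) (out : List (List String)) : Prop := out = getCorpusWithUnk_alt corpus unigramCount
instance (corpus : List (List String)) (unigramCount : List (String × Int)) (out : List (List String)) : Decidable (Spec_getCorpusWithUnk corpus unigramCount out) := by unfold Spec_getCorpusWithUnk; infer_instance

-- ===== CLAIM (what is proved, stated in full; the proofs are below) =====
def Claim_equal_getCorpusWithUnk : Prop := ∀ (corpus : List (List String)) (unigramCount : List (String × Int)), Dom_getCorpusWithUnk corpus unigramCount → Pre_getCorpusWithUnk corpus unigramCount → Spec_getCorpusWithUnk corpus unigramCount (getCorpusWithUnk corpus unigramCount)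

-- ===== LEMMAS AND PROOFS =====

-- membership in A's singleton table ↔ a direct lookup test
theorem mem_temp_iff (d : PySem.Dict String Int) (w : String) :
    (w ∈ d.keys.foldl (fun temp word =>
        if d.get? word = some 1 then temp ++ [word] else temp) ([] : List String))
      ↔ d.get? w = some 1 := by
  rw [PySem.List.foldl_append_ite_eq_filter]
  simp only [List.nil_append, List.mem_filter, decide_eq_true_eq]
  constructor
  · rintro ⟨-, h⟩; exact h
  · intro h
    refine ⟨?_, h⟩
    by_contra hk
    rw [← PySem.Dict.get?_eq_none_iff_not_mem_keys] at hk
    simp [hk] at h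

-- one Python index-loop 'for j in range(len(xs)): out.append(g(xs[j]))' is xs.map g
theorem loop_map {a b : Type} (xs : List a) (d : a) (g : a -> b) :
    (PySem.List.pyRange 0 (xs.length : Int) 1).foldl
        (fun acc i => acc ++ [g (PySem.List.pyGetD xs i d)]) [] = xs.map g := by
  rw [PySem.List.foldl_pyRange_zero_pyGetD' (f := fun acc r => acc ++ [g r])]
  rw [PySem.List.foldl_append_singleton_eq_map, List.nil_append]

-- A computes the word-wise map 'count 1 ↦ <unk>'
theorem getCorpusWithUnk_eq_map (corpus : List (List String)) (unigramCount : List (String × Int)) :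
    getCorpusWithUnk corpus unigramCount
      = corpus.map (fun row => row.map (fun w =>
          if (PySem.Dict.mk unigramCount).get? w = some 1 then "<unk>" else w)) := by
  simp only [getCorpusWithUnk]
  rw [loop_map corpus ([] : List String)
      (fun row => (PySem.List.pyRange 0 (row.length : Int) 1).foldl (fun r j =>
          if PySem.List.pyGetD row j "" ∈
              (PySem.Dict.mk unigramCount).keys.foldl (fun temp word =>
                if (PySem.Dict.mk unigramCount).get? word = some 1 then temp ++ [word] else temp) [] then
            r ++ ["<unk>"] else r ++ [PySem.List.pyGetD row j ""]) [])]
  apply List.map_congr_left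
  intro row _
  rw [show (fun (r : List String) (j : Int) =>
        if PySem.List.pyGetD row j "" ∈
            (PySem.Dict.mk unigramCount).keys.foldl (fun temp word =>
              if (PySem.Dict.mk unigramCount).get? word = some 1 then temp ++ [word] else temp) [] then
          r ++ ["<unk>"] else r ++ [PySem.List.pyGetD row j ""])
      = (fun (r : List String) (j : Int) =>
          r ++ [if (PySem.Dict.mk unigramCount).get? (PySem.List.pyGetD row j "") = some 1 then "<unk>"
                else PySem.List.pyGetD row j ""]) from ?_]
  · exact loop_map row "" (fun w => if (PySem.Dict.mk unigramCount).get? w = some 1 then "<unk>" else w)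
  · funext r j
    by_cases h : (PySem.Dict.mk unigramCount).get? (PySem.List.pyGetD row j "") = some 1
    · rw [if_pos ((mem_temp_iff _ _).mpr h), if_pos h]
    · rw [if_neg (fun hm => h ((mem_temp_iff _ _).mp hm)), if_neg h]

-- the 'row untouched unless it contains the word' fast path changes nothing
theorem sweep_guard_eq (items : List (String × Int)) (out : List (List String)) :
    items.foldl (fun o p =>
        if p.2 = 1 then o.map (fun row =>
          if p.1 ∈ row then row.map (fun w => if w = p.1 then "<unk>" else w) else row)
        else o) out
      = items.foldl (fun o p =>
          if p.2 = 1 then o.map (fun row => row.map (fun w => if w = p.1 then "<unk>" else w))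
          else o) out := by
  have hfun : (fun (o : List (List String)) (p : String × Int) =>
        if p.2 = 1 then o.map (fun row =>
          if p.1 ∈ row then row.map (fun w => if w = p.1 then "<unk>" else w) else row)
        else o)
      = (fun o p =>
          if p.2 = 1 then o.map (fun row => row.map (fun w => if w = p.1 then "<unk>" else w))
          else o) := by
    funext o p
    by_cases h : p.2 = 1
    · rw [if_pos h, if_pos h]
      apply List.map_congr_left
      intro row _
      by_cases hm : p.1 ∈ row
      · rw [if_pos hm]
      · rw [if_neg hm]
        exact ((List.map_congr_left
            (fun w hw => if_neg (fun he : w = p.1 => hm (he ▸ hw)))).trans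
          (List.map_id row)).symm
    · rw [if_neg h, if_neg h]
  rw [hfun]

-- B's corpus-level sweeps compose into one word-level fold
theorem foldl_sweeps_eq_map (items : List (String × Int)) (out : List (List String)) :
    items.foldl (fun o p =>
        if p.2 = 1 then o.map (fun row => row.map (fun w => if w = p.1 then "<unk>" else w)) else o) out
      = out.map (fun row => row.map (fun w =>
          items.foldl (fun w p => if p.2 = 1 then (if w = p.1 then "<unk>" else w) else w) w)) := by
  induction items generalizing out with
  | nil => simp
  | cons p items ih =>
    simp only [List.foldl_cons]
    by_cases h : p.2 = 1
    · rw [if_pos h, ih]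
      simp [List.map_map, Function.comp_def, h]
    · rw [if_neg h, ih]
      simp [h]

-- once a cell is "<unk>" it stays "<unk>"
theorem foldl_word_unk (items : List (String × Int)) :
    items.foldl (fun w p => if p.2 = 1 then (if w = p.1 then "<unk>" else w) else w) "<unk>" = "<unk>" := by
  induction items with
  | nil => rfl
  | cons p items ih => simp only [List.foldl_cons]; split_ifs <;> exact ih

-- a word no entry (w, 1) matches is left alone
theorem foldl_word_no_match (items : List (String × Int)) (w : String)
    (h : ∀ p ∈ items, ¬(p.1 = w ∧ p.2 = 1)) :
    items.foldl (fun w p => if p.2 = 1 then (if w = p.1 then "<unk>" else w) else w) w = w := by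
  induction items with
  | nil => rfl
  | cons p items ih =>
    simp only [List.foldl_cons]
    have hp := h p (List.mem_cons_self ..)
    split_ifs with h1 h2
    · exact absurd ⟨h2.symm, h1⟩ hp
    all_goals exact ih (fun q hq => h q (List.mem_cons_of_mem _ hq))

-- the word-level fold over the dict's items is the direct lookup test
theorem foldl_word_eq (unigramCount : List (String × Int))
    (hpre : (unigramCount.map (·.1)).Nodup) (w : String) :
    (PySem.Dict.mk unigramCount).items.foldl
        (fun w p => if p.2 = 1 then (if w = p.1 then "<unk>" else w) else w) w
      = if (PySem.Dict.mk unigramCount).get? w = some 1 then "<unk>" else w := by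
  have hnd : (PySem.Dict.mk unigramCount).keys.Nodup := by
    simpa [PySem.Dict.keys] using hpre
  by_cases h : (PySem.Dict.mk unigramCount).get? w = some 1
  · rw [if_pos h]
    have hmem : (w, (1 : Int)) ∈ (PySem.Dict.mk unigramCount).items :=
      PySem.Dict.mem_items_of_get?_eq_some _ h
    obtain ⟨l1, l2, hsplit⟩ := List.append_of_mem hmem
    have hlist : unigramCount = l1 ++ (w, 1) :: l2 := hsplit
    have hkeys : (l1.map (·.1) ++ w :: l2.map (·.1)).Nodup := by
      have hp2 := hpre
      rw [hlist] at hp2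
      simpa using hp2
    have hw1 : w ∉ l1.map (·.1) := fun hmemw =>
      (List.disjoint_of_nodup_append hkeys) hmemw (List.mem_cons_self ..)
    have hstep : (if ((w, (1 : Int)).2 = 1) then (if w = (w, (1 : Int)).1 then "<unk>" else w) else w) = "<unk>" := by simp
    rw [hsplit, List.foldl_append,
        foldl_word_no_match l1 w (fun p hp hpw => hw1 (hpw.1 ▸ List.mem_map_of_mem hp)),
        List.foldl_cons, hstep]
    exact foldl_word_unk l2
  · rw [if_neg h]
    apply foldl_word_no_match
    rintro p hp ⟨h1, h2⟩
    have : (PySem.Dict.mk unigramCount).get? w = some 1 := by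
      have := PySem.Dict.get?_of_mem_items _ (show (p.1, p.2) ∈ (PySem.Dict.mk unigramCount).items by simpa using hp) hnd
      rw [h1, h2] at this
      exact this
    exact h this

theorem getCorpusWithUnk_eq (corpus : List (List String)) (unigramCount : List (String × Int))
    (hpre : (unigramCount.map (·.1)).Nodup) :
    getCorpusWithUnk corpus unigramCount = getCorpusWithUnk_alt corpus unigramCount := by
  rw [getCorpusWithUnk_eq_map]
  simp only [getCorpusWithUnk_alt]
  rw [sweep_guard_eq, foldl_sweeps_eq_map]
  simp only [List.map_map, Function.comp_def]
  exact (List.map_congr_left (fun row _ =>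
    List.map_congr_left (fun w _ => (foldl_word_eq unigramCount hpre w).symm)))

-- ===== VERDICT (by name: the statement is the Claim_ definition above) =====
theorem getCorpusWithUnk_spec : Claim_equal_getCorpusWithUnk := by
  intro corpus unigramCount _ hpre
  exact getCorpusWithUnk_eq corpus unigramCount hpre
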